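-- pv_equiv track=rewrite | github.com/thiagopelizoni/MathChallenges | src/problem_98.py | square_map
-- ===== SOURCE A (Python) =====
-- def square_map(word, n):
--     digits = str(n)
--     mp = {}
--     used = set()
--
--     for c, d in zip(word, digits):
--         if c in mp:
--             if mp[c] != d:
--                 return None
--         elif d in used:
--             return None
--         else:
--             mp[c] = d
--             used.add(d)
--
--     return mp
-- ===== SOURCE B (Python) =====
-- def square_map(word, n):
--     pairs = list(zip(word, str(n)))
--     mp = dict(pairs)
--     if any(mp[c] != d for c, d in pairs):
--         return None
--     if len(set(mp.values())) != len(mp):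
--         return None
--     return mp
-- ===== Notes on version B (the rewrite author's own statement) =====
-- stated objective: alternative
-- what changed: A's single interleaved scan with mutable map+used-set and early returns is replaced by building the whole candidate mapping up front with dict(zip(word, str(n))) and then running two separate verification passes: a consistency pass over the zipped pairs and an injectivity check via len(set(mp.values())) == len(mp).
import Mathlib
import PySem

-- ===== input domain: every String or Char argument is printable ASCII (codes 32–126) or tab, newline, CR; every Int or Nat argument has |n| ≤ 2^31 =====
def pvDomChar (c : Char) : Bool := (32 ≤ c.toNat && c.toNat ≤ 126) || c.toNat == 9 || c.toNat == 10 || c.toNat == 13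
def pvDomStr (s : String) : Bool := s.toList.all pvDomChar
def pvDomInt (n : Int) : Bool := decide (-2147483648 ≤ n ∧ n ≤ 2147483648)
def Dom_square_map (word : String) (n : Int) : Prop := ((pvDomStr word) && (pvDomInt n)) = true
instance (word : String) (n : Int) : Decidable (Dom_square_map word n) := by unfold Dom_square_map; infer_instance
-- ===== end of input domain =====

-- B replaces A's single interleaved scan (map + used-set + early returns) with build-table-then-verify:
-- dict of all zipped pairs first, then a consistency pass over the pairs and a value-injectivity check.

-- ===== PORT A =====
-- A's loop over zip(word, str(n)): state (mp, used), early None on conflict or reused digit.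
def squareGoA (pairs : List (String × String)) (mp : PySem.Dict String String)
    (used : PySem.Set String) : Option (List (String × String)) :=
  match pairs with
  | [] => some mp.items
  | (c, d) :: rest =>
    if mp.contains c then
      if mp.get? c ≠ some d then none
      else squareGoA rest mp used
    else if used.contains d then none
    else squareGoA rest (mp.insert c d) (used.add d)

def square_map (word : String) (n : Int) : Option (List (String × String)) :=
  let digits := PySem.Int.toChars n
  let pairs := (word.toList.zip digits).map (fun p => (String.singleton p.1, String.singleton p.2))
  squareGoA pairs PySem.Dict.empty PySem.Set.empty

-- ===== PORT B =====
def square_map_alt (word : String) (n : Int) : Option (List (String × String)) :=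
  let pairs := (word.toList.zip (PySem.Int.toChars n)).map (fun p => (String.singleton p.1, String.singleton p.2))
  let mp := PySem.Dict.ofList pairs
  if pairs.any (fun p => decide (mp.get? p.1 ≠ some p.2)) then none
  else if PySem.Set.len (PySem.Set.ofList mp.values) ≠ (mp.size : Int) then none
  else some mp.items

-- ===== PRECONDITION & SPEC =====
def Spec_square_map (word : String) (n : Int) (out : Option (List (String × String))) : Prop := out = square_map_alt word n
instance (word : String) (n : Int) (out : Option (List (String × String))) : Decidable (Spec_square_map word n out) := by unfold Spec_square_map; infer_instance

-- ===== CLAIM (what is proved, stated in full; the proofs are below) =====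
def Claim_equal_square_map : Prop := ∀ (word : String) (n : Int), Dom_square_map word n → Spec_square_map word n (square_map word n)

-- ===== LEMMAS AND PROOFS =====

theorem dict_insert_eq_self (mp : PySem.Dict String String) (c d : String)
    (hk : mp.keys.Nodup) (h : mp.get? c = some d) : mp.insert c d = mp := by
  have hc : mp.contains c = true := by
    rcases Bool.eq_false_or_eq_true (mp.contains c) with h' | h'
    · exact h'
    · rw [← PySem.Dict.get?_eq_none_iff_contains] at h'; simp [h'] at h
  apply PySem.Dict.ext
  rw [PySem.Dict.items_insert_of_contains _ _ hc]
  have hid : ∀ p ∈ mp.items, (if (p.1 == c) = true then (c, d) else p) = p := by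
    intro p hp
    by_cases hpc : p.1 = c
    · have h2 : mp.get? c = some p.2 := by
        rw [← hpc]; exact PySem.Dict.get?_of_mem_items _ hp hk
      have hd : p.2 = d := Option.some_inj.mp (h2.symm.trans h)
      rw [if_pos (by simp [hpc]), ← hpc, ← hd]
    · simp [hpc]
  calc mp.items.map (fun p => if (p.1 == c) = true then (c, d) else p)
      = mp.items.map id := List.map_congr_left hid
    _ = mp.items := List.map_id _

theorem setOfList_sublist {α : Type} [BEq α] (l : List α) : (PySem.Set.ofList l).Sublist l := by
  have key : ∀ (l : List α) (s : List α), (List.foldl PySem.Set.add s l).Sublist (s ++ l) := by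
    intro l
    induction l with
    | nil => intro s; simp
    | cons x xs ih =>
      intro s
      have h1 : (List.foldl PySem.Set.add (PySem.Set.add s x) xs).Sublist (PySem.Set.add s x ++ xs) := ih _
      have h2 : (PySem.Set.add s x ++ xs).Sublist (s ++ x :: xs) := by
        unfold PySem.Set.add
        split
        · exact List.Sublist.append (List.Sublist.refl s) (List.sublist_cons_self x xs)
        · rw [List.append_assoc]; simp
      simpa [List.foldl_cons] using h1.trans h2
  simpa [PySem.Set.ofList, PySem.Set.empty] using key l []

theorem setOfList_length_iff (l : List String) :
    (PySem.Set.ofList l).length = l.length ↔ l.Nodup := by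
  constructor
  · intro h
    have := (setOfList_sublist l).eq_of_length h
    rw [← this]; exact PySem.Set.nodup_ofList l
  · intro h
    have h1 : (PySem.Set.ofList l).length ≤ l.length := (setOfList_sublist l).length_le
    have h2 : l.length ≤ (PySem.Set.ofList l).length := by
      have hsub : l ⊆ PySem.Set.ofList l := fun x hx => (PySem.Set.mem_ofList l x).mpr hx
      calc l.length = l.toFinset.card := (List.toFinset_card_of_nodup h).symm
        _ ≤ (PySem.Set.ofList l).toFinset.card := Finset.card_le_card (fun x hx => by
              simp only [List.mem_toFinset] at *; exact hsub hx)
        _ ≤ (PySem.Set.ofList l).length := (PySem.Set.ofList l).toFinset_card_le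
    omega

theorem goA_eq (pairs : List (String × String)) (mp : PySem.Dict String String)
    (used : PySem.Set String)
    (hk : mp.keys.Nodup) (hv : mp.values.Nodup)
    (hu : ∀ v, used.contains v = true ↔ v ∈ mp.values) :
    squareGoA pairs mp used =
      (if (∀ p ∈ pairs, (mp.update pairs).get? p.1 = some p.2)
          ∧ (∀ q ∈ mp.items, (mp.update pairs).get? q.1 = some q.2)
          ∧ (mp.update pairs).values.Nodup
       then some (mp.update pairs).items else none) := by
  induction pairs generalizing mp used with
  | nil =>
    have hupd : mp.update [] = mp := rfl
    rw [hupd, if_pos ⟨by simp, fun q hq => PySem.Dict.get?_of_mem_items _ hq hk, hv⟩]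
    rfl
  | cons p rest ih =>
    obtain ⟨c, d⟩ := p
    have hupd : mp.update ((c, d) :: rest) = (mp.insert c d).update rest := rfl
    by_cases hc : mp.contains c = true
    · obtain ⟨v, hv0⟩ : ∃ v, mp.get? c = some v := by
        cases hgc : mp.get? c with
        | none => rw [PySem.Dict.get?_eq_none_iff_contains] at hgc; simp [hgc] at hc
        | some v => exact ⟨v, rfl⟩
      by_cases hvd : v = d
      · subst hvd
        have hins : mp.insert c v = mp := dict_insert_eq_self mp c v hk hv0
        have hmem : (c, v) ∈ mp.items := PySem.Dict.mem_items_of_get?_eq_some _ hv0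
        rw [squareGoA]
        simp only [hc, if_true, hv0, ne_eq, not_true_eq_false, if_false, ]
        rw [ih mp used hk hv hu, hupd, hins]
        apply if_congr _ rfl rfl
        constructor
        · rintro ⟨h1, h2, h3⟩
          refine ⟨?_, h2, h3⟩
          intro p hp
          rcases List.mem_cons.mp hp with hpe | hp'
          · rw [hpe]; exact h2 _ hmem
          · exact h1 p hp'
        · rintro ⟨h1, h2, h3⟩
          exact ⟨fun p hp => h1 p (List.mem_cons_of_mem _ hp), h2, h3⟩
      · rw [squareGoA]
        simp only [hc, if_true]
        rw [if_pos (by rw [hv0]; exact fun h => hvd (Option.some_inj.mp h))]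
        rw [if_neg]
        rintro ⟨h1, h2, h3⟩
        have hA : (mp.update ((c, d) :: rest)).get? c = some d := h1 (c, d) List.mem_cons_self
        have hB : (mp.update ((c, d) :: rest)).get? c = some v :=
          h2 (c, v) (PySem.Dict.mem_items_of_get?_eq_some _ hv0)
        exact hvd (Option.some_inj.mp (hB.symm.trans hA))
    · have hcF : mp.contains c = false := Bool.not_eq_true _ |>.mp hc
      by_cases hd : used.contains d = true
      · have hdv : d ∈ mp.values := (hu d).mp hd
        rw [squareGoA]
        simp only [hcF, Bool.false_eq_true, if_false, hd, if_true]
        rw [if_neg]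
        rintro ⟨h1, h2, h3⟩
        obtain ⟨q, hq, hq2⟩ := List.mem_map.mp hdv
        have hqk : q.1 ≠ c := by
          intro he
          have hmemk : c ∈ mp.keys := he ▸ List.mem_map_of_mem hq
          rw [← PySem.Dict.contains_iff_mem_keys, hcF] at hmemk
          exact Bool.false_ne_true hmemk
        have hc' : (c, d) ∈ (mp.update ((c, d) :: rest)).items :=
          PySem.Dict.mem_items_of_get?_eq_some _ (h1 (c, d) List.mem_cons_self)
        have h2q := h2 q hq
        rw [hq2] at h2q
        have hq' : (q.1, d) ∈ (mp.update ((c, d) :: rest)).items :=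
          PySem.Dict.mem_items_of_get?_eq_some _ h2q
        have heq := List.inj_on_of_nodup_map h3 hc' hq' rfl
        exact hqk (congrArg Prod.fst heq).symm
      · have hdF : used.contains d = false := Bool.not_eq_true _ |>.mp hd
        have hdv : d ∉ mp.values := fun h => by
          rw [(hu d).mpr h] at hdF; exact Bool.true_eq_false.mp hdF
        have hcK : c ∉ mp.keys := fun h => by
          rw [← PySem.Dict.contains_iff_mem_keys, hcF] at h; exact Bool.false_ne_true h
        have hitems' : (mp.insert c d).items = mp.items ++ [(c, d)] :=
          PySem.Dict.items_insert_of_not_contains _ _ hcF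
        have hval_eq : (mp.insert c d).values = mp.values ++ [d] := by
          show (mp.insert c d).items.map (fun x => x.2) = _
          rw [hitems']; simp [PySem.Dict.values]
        have hkeys' : (mp.insert c d).keys.Nodup := by
          rw [PySem.Dict.keys_insert_of_not_contains _ _ hcF]
          rw [List.nodup_append]
          exact ⟨hk, List.nodup_singleton _, by intro a ha b hb he; rw [he, List.mem_singleton.mp hb] at ha; exact hcK ha⟩
        have hvals' : (mp.insert c d).values.Nodup := by
          rw [hval_eq, List.nodup_append]
          exact ⟨hv, List.nodup_singleton _, by intro a ha b hb he; rw [he, List.mem_singleton.mp hb] at ha; exact hdv ha⟩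
        have hu' : ∀ v, (used.add d).contains v = true ↔ v ∈ (mp.insert c d).values := by
          intro v
          have hadd : PySem.Set.add used d = used ++ [d] := by
            unfold PySem.Set.add
            rw [if_neg (by rw [show used.contains d = PySem.Set.contains used d from rfl, hdF]; exact Bool.false_ne_true)]
          have hmu : v ∈ used ↔ v ∈ mp.values := by
            rw [← hu v]; simp [PySem.Set.contains]
          show (PySem.Set.add used d).contains v = true ↔ _
          rw [hadd, hval_eq]
          show ((used ++ [d]).contains v = true) ↔ _
          simp [List.mem_append, hmu]
        rw [squareGoA]
        simp only [hcF, Bool.false_eq_true, if_false, hdF]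
        rw [ih _ _ hkeys' hvals' hu', hupd]
        apply if_congr _ rfl rfl
        rw [hitems']
        constructor
        · rintro ⟨h1, h2, h3⟩
          refine ⟨?_, fun q hq => h2 q (by simp [hq]), h3⟩
          intro p hp
          rcases List.mem_cons.mp hp with hpe | hp'
          · rw [hpe]; exact h2 (c, d) (by simp)
          · exact h1 p hp'
        · rintro ⟨h1, h2, h3⟩
          refine ⟨fun p hp => h1 p (List.mem_cons_of_mem _ hp), ?_, h3⟩
          intro q hq
          rcases List.mem_append.mp hq with hq' | hq'
          · exact h2 q hq'
          · rw [List.mem_singleton.mp hq']; exact h1 (c, d) List.mem_cons_self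

theorem square_map_spec : Claim_equal_square_map := by
  unfold Claim_equal_square_map
  intro word n _
  unfold Spec_square_map square_map square_map_alt
  simp only []
  rw [goA_eq _ PySem.Dict.empty PySem.Set.empty PySem.Dict.nodup_keys_empty
      (by simp [PySem.Dict.values, PySem.Dict.empty])
      (by intro v; simp [PySem.Set.empty, PySem.Set.contains, PySem.Dict.values, PySem.Dict.empty])]
  generalize hps : (word.toList.zip (PySem.Int.toChars n)).map
      (fun p => (String.singleton p.1, String.singleton p.2)) = pairs
  have hF : (PySem.Dict.empty : PySem.Dict String String).update pairs = PySem.Dict.ofList pairs := rfl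
  rw [hF]
  generalize hFs : (PySem.Dict.ofList pairs : PySem.Dict String String) = F
  by_cases h1 : ∀ p ∈ pairs, F.get? p.1 = some p.2
  · have hany : pairs.any (fun p => decide (F.get? p.1 ≠ some p.2)) = false := by
      rw [List.any_eq_false]; intro p hp; simpa using h1 p hp
    simp only [hany, Bool.false_eq_true, if_false]
    by_cases h3 : F.values.Nodup
    · rw [if_pos ⟨h1, by simp [PySem.Dict.empty], h3⟩]
      rw [if_neg]
      intro hne
      apply hne
      have hlen : (PySem.Set.ofList F.values).length = F.values.length :=
        (setOfList_length_iff F.values).mpr h3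
      show ((PySem.Set.ofList F.values).length : Int) = (F.size : Int)
      rw [hlen]
      show ((F.values.length : Nat) : Int) = ((F.items.length : Nat) : Int)
      rw [show F.values.length = F.items.length from List.length_map ..]
    · rw [if_neg (fun h => h3 h.2.2)]
      rw [if_pos]
      intro heq
      apply h3
      rw [← setOfList_length_iff F.values]
      have : ((PySem.Set.ofList F.values).length : Int) = (F.size : Int) := heq
      have hsz : F.size = F.items.length := rfl
      have hvl : F.values.length = F.items.length := List.length_map ..
      omega
  · rw [if_neg (fun h => h1 h.1)]
    have hany : pairs.any (fun p => decide (F.get? p.1 ≠ some p.2)) = true := by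
      rw [List.any_eq_true]
      push Not at h1
      obtain ⟨p, hp, hne⟩ := h1
      exact ⟨p, hp, by simpa using hne⟩
    simp only [hany, if_true]
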